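-- pv_equiv track=rewrite | github.com/XcapeAxis/ML-Quant-Research-OS | quant_mvp/memory/writeback.py | _looks_data_blocked_text
-- ===== SOURCE A (Python) =====
-- def _looks_data_blocked_text(text: str) -> bool:
--     lowered = str(text or "").strip().lower()
--     return any(
--         token in lowered
--         for token in [
--             "usable validated bars",
--             "validated bars for the frozen universe",
--             "missing research inputs",
--             "missing validated inputs",
--             "no validated bars",
--             "coverage gap",
--             "partial coverage",
--             "readiness gate",
--             "research-readiness gate",
--             "data readiness",
--             "可用日频",
--             "缺少研究输入",
--             "缺少可用的 validated",
--             "缺少可用的已验证",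
--             "无可用",
--             "覆盖缺口",
--             "覆盖率不足",
--             "数据就绪",
--         ]
--     )
-- ===== SOURCE B (Python) =====
-- _DATA_BLOCKED_TOKENS = [
--     "usable validated bars",
--     "validated bars for the frozen universe",
--     "missing research inputs",
--     "missing validated inputs",
--     "no validated bars",
--     "coverage gap",
--     "partial coverage",
--     "readiness gate",
--     "research-readiness gate",
--     "data readiness",
--     "可用日频",
--     "缺少研究输入",
--     "缺少可用的 validated",
--     "缺少可用的已验证",
--     "无可用",
--     "覆盖缺口",
--     "覆盖率不足",
--     "数据就绪",
-- ]
--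
--
-- def _looks_data_blocked_text(text: str) -> bool:
--     # One left-to-right scan: at each position, test whether some marker
--     # starts exactly there (instead of one full substring search per marker).
--     s = str(text or "").strip().lower()
--     for i in range(len(s)):
--         if any(s.startswith(tok, i) for tok in _DATA_BLOCKED_TOKENS):
--             return True
--     return False
-- ===== Notes on version B (the rewrite author's own statement) =====
-- stated objective: alternative
-- what changed: Replaces the token-outer loop of full substring searches ('token in lowered' per marker) by a single position-outer scan of the normalized text that tests at each position whether any marker starts there.
import Mathlib
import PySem

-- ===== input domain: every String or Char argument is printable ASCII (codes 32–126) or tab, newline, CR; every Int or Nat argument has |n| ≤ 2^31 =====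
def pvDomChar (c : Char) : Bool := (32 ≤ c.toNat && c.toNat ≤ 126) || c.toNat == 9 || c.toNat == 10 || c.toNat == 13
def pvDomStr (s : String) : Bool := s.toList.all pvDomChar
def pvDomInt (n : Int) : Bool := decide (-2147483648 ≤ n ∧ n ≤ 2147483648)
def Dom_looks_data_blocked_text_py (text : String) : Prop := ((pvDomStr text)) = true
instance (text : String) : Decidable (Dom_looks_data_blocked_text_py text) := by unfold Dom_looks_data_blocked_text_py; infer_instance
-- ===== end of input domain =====

-- B replaces A's per-marker full substring searches by one left-to-right scan of the
-- normalized text, testing at each position whether some marker starts there (alternative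
-- decomposition, same cost class).

-- ===== PORT A =====
-- the marker list, as in A's generator expression
def pvTokensA : List String :=
  ["usable validated bars",
   "validated bars for the frozen universe",
   "missing research inputs",
   "missing validated inputs",
   "no validated bars",
   "coverage gap",
   "partial coverage",
   "readiness gate",
   "research-readiness gate",
   "data readiness",
   "可用日频",
   "缺少研究输入",
   "缺少可用的 validated",
   "缺少可用的已验证",
   "无可用",
   "覆盖缺口",
   "覆盖率不足",
   "数据就绪"]

def looks_data_blocked_text_py (text : String) : Bool :=
  -- str(text or "") is text itself (the empty string stays empty)
  let lowered := PySem.Str.lower (PySem.Str.strip text)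
  pvTokensA.any (fun token => PySem.Str.isIn token lowered)

-- ===== PORT B =====
-- same marker list, held as module-level constant in Source B
def pvTokensB : List (List Char) := pvTokensA.map String.toList

-- Source B's index loop `for i in range(len(s)): if any(s.startswith(tok, i) ...)`.
-- s.startswith(tok, i) with 0 ≤ i is ported by hand (PySem has no start argument) as
-- `PySem.Chars.startswith (chars.drop i) tok`, which is exact there.
def looks_data_blocked_text_py_alt (text : String) : Bool :=
  let s := PySem.Str.lower (PySem.Str.strip text)
  (PySem.List.pyRange 0 (s.toList.length : Int) 1).any (fun i =>
    pvTokensB.any (fun tok => PySem.Chars.startswith (s.toList.drop i.toNat) tok))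

-- ===== PRECONDITION & SPEC =====
def Spec_looks_data_blocked_text_py (text : String) (out : Bool) : Prop := out = looks_data_blocked_text_py_alt text
instance (text : String) (out : Bool) : Decidable (Spec_looks_data_blocked_text_py text out) := by unfold Spec_looks_data_blocked_text_py; infer_instance

-- ===== CLAIM (what is proved, stated in full; the proofs are below) =====
def Claim_equal_looks_data_blocked_text_py : Prop := ∀ (text : String), Dom_looks_data_blocked_text_py text → Spec_looks_data_blocked_text_py text (looks_data_blocked_text_py text)

-- ===== LEMMAS AND PROOFS =====

-- every marker is a nonempty string
theorem pvTokensB_ne_nil : ∀ t ∈ pvTokensB, t ≠ [] := by decide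

-- B's scan finds exactly the positions at which some marker is a prefix
theorem pvScan_iff (s : List Char) :
    ((PySem.List.pyRange 0 (s.length : Int) 1).any (fun i =>
      pvTokensB.any (fun tok => PySem.Chars.startswith (s.drop i.toNat) tok)) = true)
    ↔ ∃ t ∈ pvTokensB, ∃ j, t <+: s.drop j := by
  rw [List.any_eq_true]
  constructor
  · rintro ⟨i, hi, hin⟩
    rw [PySem.List.mem_pyRange_one] at hi
    obtain ⟨t, ht, hsw⟩ := List.any_eq_true.mp hin
    exact ⟨t, ht, i.toNat, (PySem.Chars.startswith_iff _ _).mp hsw⟩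
  · rintro ⟨t, ht, j, hpre⟩
    by_cases hj : j < s.length
    · refine ⟨(j : Int), ?_, List.any_eq_true.mpr
        ⟨t, ht, (PySem.Chars.startswith_iff _ _).mpr (by simpa using hpre)⟩⟩
      rw [PySem.List.mem_pyRange_one]
      omega
    · rw [List.drop_eq_nil_of_le (by omega)] at hpre
      exact absurd (List.prefix_nil.mp hpre) (pvTokensB_ne_nil t ht)

theorem looks_data_blocked_text_py_spec : Claim_equal_looks_data_blocked_text_py := by
  intro text _
  show looks_data_blocked_text_py text = looks_data_blocked_text_py_alt text
  unfold looks_data_blocked_text_py looks_data_blocked_text_py_alt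
  rw [Bool.eq_iff_iff, pvScan_iff]
  constructor
  · intro h
    obtain ⟨tok, htok, hin⟩ := List.any_eq_true.mp h
    obtain ⟨j, hpre⟩ := (PySem.Chars.exists_prefix_drop_iff_isIn _ _).mpr
      ((PySem.Chars.isIn_iff_infix _ _).mpr
        ((PySem.Str.isIn_iff_infix tok _).mp hin))
    exact ⟨tok.toList, List.mem_map_of_mem htok, j, hpre⟩
  · rintro ⟨t, ht, j, hpre⟩
    obtain ⟨tok, htok, rfl⟩ := List.mem_map.mp ht
    refine List.any_eq_true.mpr ⟨tok, htok, ?_⟩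
    exact (PySem.Str.isIn_iff_infix tok _).mpr
      ((PySem.Chars.isIn_iff_infix _ _).mp
        ((PySem.Chars.exists_prefix_drop_iff_isIn _ _).mp ⟨j, hpre⟩))

-- ===== VERDICT (by name: the statement is the Claim_ definition above) =====
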